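-- pv_equiv track=rewrite | github.com/imJiawen/UoT | src/uot/oracle_examiner.py | _support_answer_consensus
-- ===== SOURCE A (Python) =====
-- from typing import Any, Dict, List, Optional, Sequence, Tuple
--
-- def _support_answer_consensus(
--
--     answer_map: Dict[str, str],
--     support_candidates: Sequence[str],
-- ) -> Tuple[Optional[str], Dict[str, int]]:
--     counts = {"yes": 0, "no": 0, "pass": 0}
--     labels: List[str] = []
--
--     for cand in support_candidates:
--         label = answer_map.get(cand)
--         if label not in counts:
--             continue
--         counts[label] += 1
--         labels.append(label)
--
--     if not labels:
--         return None, counts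
--
--     unique = set(labels)
--     if len(unique) == 1:
--         return labels[0], counts
--     return None, counts
-- ===== SOURCE B (Python) =====
-- from typing import Dict, Optional, Sequence, Tuple
--
-- def _support_answer_consensus(
--     answer_map: Dict[str, str],
--     support_candidates: Sequence[str],
-- ) -> Tuple[Optional[str], Dict[str, int]]:
--     # Staged: one counting pass per label, then consensus = the label that owns ALL votes.
--     counts = {k: sum(1 for c in support_candidates if answer_map.get(c) == k)
--               for k in ("yes", "no", "pass")}
--     total = sum(counts.values())
--     winner = next((k for k, v in counts.items() if v != 0 and v == total), None)
--     return winner, counts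
-- ===== Notes on version B (the rewrite author's own statement) =====
-- stated objective: alternative
-- what changed: B replaces A's single stateful pass (counts dict updated together with a labels list, consensus via set-uniqueness of the label sequence) by staged per-label counting passes (one count per key via a generator sum) and derives the consensus as the unique label whose count equals the total vote count.
import Mathlib
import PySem

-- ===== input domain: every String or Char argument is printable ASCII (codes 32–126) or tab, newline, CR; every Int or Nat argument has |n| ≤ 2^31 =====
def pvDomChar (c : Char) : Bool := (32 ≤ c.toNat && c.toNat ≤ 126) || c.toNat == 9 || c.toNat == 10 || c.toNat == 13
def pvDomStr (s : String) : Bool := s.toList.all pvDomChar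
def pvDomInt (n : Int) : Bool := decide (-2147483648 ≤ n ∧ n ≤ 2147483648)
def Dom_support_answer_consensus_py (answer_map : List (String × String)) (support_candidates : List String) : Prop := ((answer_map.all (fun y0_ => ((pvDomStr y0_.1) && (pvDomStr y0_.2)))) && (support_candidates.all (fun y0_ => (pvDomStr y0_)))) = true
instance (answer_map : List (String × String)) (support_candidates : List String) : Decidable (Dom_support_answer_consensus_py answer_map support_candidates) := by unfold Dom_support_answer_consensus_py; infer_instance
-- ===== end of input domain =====

-- B replaces A's single stateful pass (counts dict + labels list + set-uniqueness test) by
-- staged per-label counting passes and derives the consensus as the label owning ALL votes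
-- (objective: simpler/alternative decomposition, same O(n) cost).

-- ===== PORT A =====
def support_answer_consensus_py (answer_map : List (String × String)) (support_candidates : List String) : Option String × (List (String × Int)) :=
  let amap := PySem.Dict.ofList answer_map
  let counts0 : PySem.Dict String Int := PySem.Dict.ofList [("yes", 0), ("no", 0), ("pass", 0)]
  let st := support_candidates.foldl (fun (st : PySem.Dict String Int × List String) cand =>
    match amap.get? cand with
    | none => st
    | some label =>
      if st.1.contains label then (st.1.modify label 0 (· + 1), st.2 ++ [label]) else st)
    (counts0, [])
  if st.2.isEmpty then (none, st.1.items)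
  else if (PySem.Set.ofList st.2).length == 1 then (PySem.List.pyGet? st.2 0, st.1.items)
  else (none, st.1.items)

-- ===== PORT B =====
def support_answer_consensus_py_alt (answer_map : List (String × String)) (support_candidates : List String) : Option String × (List (String × Int)) :=
  let amap := PySem.Dict.ofList answer_map
  let counts : PySem.Dict String Int := PySem.Dict.mk
    ((["yes", "no", "pass"]).map (fun k =>
      (k, support_candidates.foldl (fun acc cand => if amap.get? cand == some k then acc + 1 else acc) (0 : Int))))
  let total := (counts.items.map (·.2)).sum
  let winner := (counts.items.find? (fun kv => kv.2 != 0 && kv.2 == total)).map (·.1)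
  (winner, counts.items)

-- ===== PRECONDITION & SPEC =====
def Spec_support_answer_consensus_py (answer_map : List (String × String)) (support_candidates : List String) (out : Option String × (List (String × Int))) : Prop := out = support_answer_consensus_py_alt answer_map support_candidates
instance (answer_map : List (String × String)) (support_candidates : List String) (out : Option String × (List (String × Int))) : Decidable (Spec_support_answer_consensus_py answer_map support_candidates out) := by unfold Spec_support_answer_consensus_py; infer_instance

-- ===== CLAIM (what is proved, stated in full; the proofs are below) =====
def Claim_equal_support_answer_consensus_py : Prop := ∀ (answer_map : List (String × String)) (support_candidates : List String), Dom_support_answer_consensus_py answer_map support_candidates → Spec_support_answer_consensus_py answer_map support_candidates (support_answer_consensus_py answer_map support_candidates)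

-- ===== LEMMAS AND PROOFS =====

-- the counts table as a function of the accepted-label list
def pvC (ls : List String) : PySem.Dict String Int :=
  PySem.Dict.mk [("yes", (ls.count "yes" : Int)), ("no", (ls.count "no" : Int)), ("pass", (ls.count "pass" : Int))]

-- the stream of accepted labels, as a pure fold step
def pvLab (amap : PySem.Dict String String) (ls : List String) (c : String) : List String :=
  match amap.get? c with
  | none => ls
  | some l => if l == "yes" || l == "no" || l == "pass" then ls ++ [l] else ls

theorem pv_contains (ls : List String) (l : String) :
    (pvC ls).contains l = (l == "yes" || l == "no" || l == "pass") := by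
  simp [pvC, PySem.Dict.contains_mk, BEq.comm, Bool.or_assoc]

theorem pv_step (ls : List String) (label : String)
    (h : label = "yes" ∨ label = "no" ∨ label = "pass") :
    (pvC ls).modify label 0 (· + 1) = pvC (ls ++ [label]) := by
  apply PySem.Dict.ext
  rcases h with h | h | h <;> subst h <;>
    simp [pvC, PySem.Dict.modify, PySem.Dict.insert, PySem.Dict.getD, PySem.Dict.get?,
      PySem.Dict.contains, List.count_append]

-- A's fold keeps the invariant: state = (pvC ls, ls), ls the accepted-label stream
theorem pv_fold_pair (amap : PySem.Dict String String) (sc : List String) :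
    ∀ ls : List String,
      sc.foldl (fun (st : PySem.Dict String Int × List String) cand =>
        match amap.get? cand with
        | none => st
        | some label =>
          if st.1.contains label then (st.1.modify label 0 (· + 1), st.2 ++ [label]) else st)
        (pvC ls, ls)
      = (pvC (sc.foldl (pvLab amap) ls), sc.foldl (pvLab amap) ls) := by
  induction sc with
  | nil => intro ls; rfl
  | cons cand rest ih =>
    intro ls
    simp only [List.foldl_cons]
    cases h : amap.get? cand with
    | none => simpa [pvLab, h] using ih ls
    | some label =>
      by_cases hc : (label == "yes" || label == "no" || label == "pass") = true
      · have h3 : label = "yes" ∨ label = "no" ∨ label = "pass" := by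
          have h2 := hc; simp at h2; tauto
        have hstep := pv_step ls label h3
        simpa [pvLab, h, pv_contains, hc, hstep] using ih (ls ++ [label])
      · simpa [pvLab, h, pv_contains, hc] using ih ls

-- B's per-label counting pass counts that label's occurrences in the accepted-label stream
set_option maxRecDepth 4000 in
theorem pv_count_fold (amap : PySem.Dict String String) (k : String)
    (hk : k = "yes" ∨ k = "no" ∨ k = "pass") (sc : List String) :
    ∀ ls : List String,
      sc.foldl (fun acc cand => if amap.get? cand == some k then acc + 1 else acc)
        ((ls.count k : Int))
      = (((sc.foldl (pvLab amap) ls).count k : Int)) := by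
  induction sc with
  | nil => intro ls; rfl
  | cons cand rest ih =>
    intro ls
    simp only [List.foldl_cons]
    cases h : amap.get? cand with
    | none => simpa [pvLab, h] using ih ls
    | some l =>
      by_cases hlk : l = k
      · subst hlk
        have hc : (l == "yes" || l == "no" || l == "pass") = true := by
          rcases hk with h' | h' | h' <;> simp [h']
        have h1 := ih (ls ++ [l])
        have hcount : (((ls ++ [l]).count l : Int)) = ((ls.count l : Int)) + 1 := by
          simp [List.count_append]
        rw [hcount] at h1
        simpa [pvLab, h, hc] using h1
      · by_cases hc : (l == "yes" || l == "no" || l == "pass") = true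
        · have h1 := ih (ls ++ [l])
          have hcount : (((ls ++ [l]).count k : Int)) = ((ls.count k : Int)) := by
            simp [List.count_append, hlk]
          rw [hcount] at h1
          have hne : (some l == some k) = false := by simp [hlk]
          simpa [pvLab, h, hc, hne] using h1
        · have hne : (some l == some k) = false := by simp [hlk]
          simpa [pvLab, h, hc, hne] using ih ls

theorem pv_mem_fold (amap : PySem.Dict String String) (sc : List String) :
    ∀ ls : List String, (∀ x ∈ ls, x = "yes" ∨ x = "no" ∨ x = "pass") →
      ∀ x ∈ sc.foldl (pvLab amap) ls, x = "yes" ∨ x = "no" ∨ x = "pass" := by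
  induction sc with
  | nil => intro ls h; exact h
  | cons cand rest ih =>
    intro ls hls
    simp only [List.foldl_cons]
    apply ih
    intro x hx
    cases h : amap.get? cand with
    | none => simp only [pvLab, h] at hx; exact hls x hx
    | some l =>
      by_cases hc : (l == "yes" || l == "no" || l == "pass") = true
      · simp only [pvLab, h, if_pos hc, List.mem_append] at hx
        rcases hx with hx | hx
        · exact hls x hx
        · simp at hx; subst hx
          have h2 := hc; simp at h2; tauto
      · simp only [pvLab, h, if_neg hc] at hx
        exact hls x hx

theorem pv_total (ls : List String) (hmem : ∀ x ∈ ls, x = "yes" ∨ x = "no" ∨ x = "pass") :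
    ((ls.count "yes" : Int)) + ((ls.count "no" : Int)) + ((ls.count "pass" : Int)) = (ls.length : Int) := by
  induction ls with
  | nil => rfl
  | cons h t ih =>
    have ht := ih (fun x hx => hmem x (List.mem_cons_of_mem _ hx))
    have hh := hmem h (by simp)
    rcases hh with hh | hh | hh <;> subst hh <;>
      simp [List.count_cons] <;> push_cast <;> omega

-- a Nodup list whose members are all equal to its member h is [h]
theorem pv_singleton (l : List String) (h : String) (hnd : l.Nodup)
    (hall : ∀ x ∈ l, x = h) (hmem : h ∈ l) : l = [h] := by
  cases l with
  | nil => simp at hmem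
  | cons a t =>
    have ha : a = h := hall a (by simp)
    subst ha
    cases t with
    | nil => rfl
    | cons b t2 =>
      have hb : b = a := hall b (by simp)
      subst hb
      simp at hnd

theorem pv_count_zero_t (t : List String) (h k : String) (hone : ∀ x ∈ t, x = h)
    (hk : k ≠ h) : t.count k = 0 :=
  List.count_eq_zero.mpr (fun hm => hk (hone _ hm))

-- A's decision from the label list equals B's decision from the counts table
theorem pv_decision (ls : List String) (hmem : ∀ x ∈ ls, x = "yes" ∨ x = "no" ∨ x = "pass") :
    (if ls.isEmpty then ((none : Option String), (pvC ls).items)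
     else if (PySem.Set.ofList ls).length == 1 then (PySem.List.pyGet? ls 0, (pvC ls).items)
     else (none, (pvC ls).items))
    = (((pvC ls).items.find? (fun kv =>
          kv.2 != 0 && kv.2 == ((pvC ls).items.map (·.2)).sum)).map (·.1), (pvC ls).items) := by
  have htot := pv_total ls hmem
  cases ls with
  | nil => decide
  | cons h t =>
    have hh3 : h = "yes" ∨ h = "no" ∨ h = "pass" := hmem h (by simp)
    by_cases hone : ∀ x ∈ t, x = h
    · -- unanimous: both sides are `some h`
      have hallls : ∀ x ∈ h :: t, x = h := by
        intro x hx; rcases List.mem_cons.mp hx with hx | hx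
        · exact hx
        · exact hone x hx
      have hset : PySem.Set.ofList (h :: t) = [h] :=
        pv_singleton _ h (PySem.Set.nodup_ofList _)
          (fun x hx => hallls x ((PySem.Set.mem_ofList _ _).mp hx))
          ((PySem.Set.mem_ofList _ _).mpr (by simp))
      rcases hh3 with hh | hh | hh <;> subst hh
      · have h1 := pv_count_zero_t t _ "no" hone (by decide)
        have h2 := pv_count_zero_t t _ "pass" hone (by decide)
        have hp : ((t.count "yes" : Int)) + 1 ≠ 0 := by positivity
        simp [hset, pvC, PySem.List.pyGet?, PySem.List.pyIdx?, h1, h2, hp, List.count_cons]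
      · have h1 := pv_count_zero_t t _ "yes" hone (by decide)
        have h2 := pv_count_zero_t t _ "pass" hone (by decide)
        have hp : ((t.count "no" : Int)) + 1 ≠ 0 := by positivity
        simp [hset, pvC, PySem.List.pyGet?, PySem.List.pyIdx?, h1, h2, hp, List.count_cons]
      · have h1 := pv_count_zero_t t _ "yes" hone (by decide)
        have h2 := pv_count_zero_t t _ "no" hone (by decide)
        have hp : ((t.count "pass" : Int)) + 1 ≠ 0 := by positivity
        simp [hset, pvC, PySem.List.pyGet?, PySem.List.pyIdx?, h1, h2, hp, List.count_cons]
    · -- not unanimous: both sides are none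
      push_neg at hone
      obtain ⟨x, hx, hxh⟩ := hone
      have hxls : x ∈ h :: t := List.mem_cons_of_mem _ hx
      have hA : (PySem.Set.ofList (h :: t)).length ≠ 1 := by
        intro hlen
        obtain ⟨k, hk⟩ := List.length_eq_one_iff.mp hlen
        have h1 : h = k := by
          have := (PySem.Set.mem_ofList _ _).mpr (show h ∈ h :: t by simp)
          rw [hk] at this; simpa using this
        have h2 : x = k := by
          have := (PySem.Set.mem_ofList _ _).mpr hxls
          rw [hk] at this; simpa using this
        exact hxh (h1 ▸ h2 ▸ rfl)
      -- each key's count is either zero or strictly below the total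
      have hcond : ∀ k : String, (((h :: t).count k : Int) != 0 &&
          ((h :: t).count k : Int) == ((h :: t).length : Int)) = false := by
        intro k
        by_cases hz : (h :: t).count k = 0
        · simp [hz]
        · have hkmem : k ∈ h :: t := List.count_pos_iff.mp (Nat.pos_of_ne_zero hz)
          have hne : ∃ y ∈ h :: t, y ≠ k := by
            by_cases hkh : k = h
            · exact ⟨x, hxls, by rw [hkh]; exact hxh⟩
            · exact ⟨h, by simp, fun he => hkh he.symm⟩
          have hlt : (h :: t).count k < (h :: t).length := by
            rcases Nat.lt_or_ge ((h :: t).count k) ((h :: t).length) with hlt | hge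
            · exact hlt
            · exfalso
              have heq : (h :: t).count k = (h :: t).length :=
                Nat.le_antisymm (List.count_le_length) hge
              obtain ⟨y, hy, hyk⟩ := hne
              exact hyk ((List.count_eq_length.mp heq) y hy).symm
          have hne2 : ((h :: t).count k : Int) ≠ (t.length : Int) + 1 := by
            exact_mod_cast Nat.ne_of_lt hlt
          simp [hne2]
      have e1 := hcond "yes"; have e2 := hcond "no"; have e3 := hcond "pass"
      have hsum : ((h :: t).count "yes" : Int) + (((h :: t).count "no" : Int) +
          (((h :: t).count "pass" : Int) + 0)) = ((h :: t).length : Int) := by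
        rw [← htot]; ring
      simp only [pvC, PySem.Dict.mk, List.isEmpty_cons, Bool.false_eq_true, if_false,
        PySem.Dict.items, List.map_cons, List.map_nil, List.sum_cons, List.sum_nil, hsum,
        List.find?]
      rw [e1, e2, e3]
      simp [hA]

theorem pv_main (am : List (String × String)) (sc : List String) :
    support_answer_consensus_py am sc = support_answer_consensus_py_alt am sc := by
  have h0 : (PySem.Dict.ofList [("yes", (0:Int)), ("no", 0), ("pass", 0)]) = pvC [] := by decide
  unfold support_answer_consensus_py support_answer_consensus_py_alt
  simp only [h0, List.map_cons, List.map_nil]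
  rw [pv_fold_pair (PySem.Dict.ofList am) sc []]
  have cy := pv_count_fold (PySem.Dict.ofList am) "yes" (Or.inl rfl) sc []
  have cn := pv_count_fold (PySem.Dict.ofList am) "no" (Or.inr (Or.inl rfl)) sc []
  have cp := pv_count_fold (PySem.Dict.ofList am) "pass" (Or.inr (Or.inr rfl)) sc []
  simp only [List.count_nil, Nat.cast_zero] at cy cn cp
  rw [cy, cn, cp]
  exact pv_decision (sc.foldl (pvLab (PySem.Dict.ofList am)) [])
    (pv_mem_fold (PySem.Dict.ofList am) sc [] (by simp))

-- ===== VERDICT (by name: the statement is the Claim_ definition above) =====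
theorem support_answer_consensus_py_spec : Claim_equal_support_answer_consensus_py := by
  intro answer_map support_candidates _
  unfold Spec_support_answer_consensus_py
  exact pv_main answer_map support_candidates
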